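-- pv_equiv track=rewrite | github.com/JianCheng/bibtex2html.py | bibtex2html/bibtex2html.py | is_author_selected
-- ===== SOURCE A (Python) =====
-- def is_author_selected(entry, names, select_field=''):
--     '''Return true if the author list of the entry is selected.
--
--     Parameters
--     ----------
--         entry        :   bibtex entry
--         names        :   selected author names
--         select_field :   'first': first author;  'corresponding': corresponding author; '': first or corresponding author
--
--     Returns
--     -------
--         is_selected : boolean
--     '''
--
--     author_names = entry['author'].split(', ')
--     k = 'author_' + select_field
--     if select_field=='first':
--         if author_names[0] in names:
--             return True
--         elif k in entry:
--             authorFirst_names = entry[k].split(', ')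
--             for name in authorFirst_names:
--                 if name in names:
--                     return True
--         return False
--     elif select_field=='corresponding':
--         if not k in entry:
--             return False
--         else:
--             authorCorr_names = entry[k].split(', ')
--             for name in authorCorr_names:
--                 if name in names:
--                     return True
--         return False
--     elif select_field=='':
--         return is_author_selected(entry, names, 'first') or is_author_selected(entry, names, 'corresponding')
--     else:
--         raise ValueError("Wrong select_field ('first', 'corresponding', or '')!")
-- ===== SOURCE B (Python) =====
-- def is_author_selected(entry, names, select_field=''):
--     '''Return true if the author list of the entry is selected.
--
--     Builds one candidate-name list according to select_field, then does a
--     single membership scan (no recursion, no per-branch loops).'''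
--     author_names = entry['author'].split(', ')
--     if select_field not in ('', 'first', 'corresponding'):
--         raise ValueError("Wrong select_field ('first', 'corresponding', or '')!")
--     candidates = []
--     if select_field != 'corresponding':
--         candidates.append(author_names[0])
--         if 'author_first' in entry:
--             candidates += entry['author_first'].split(', ')
--     if select_field != 'first' and 'author_corresponding' in entry:
--         candidates += entry['author_corresponding'].split(', ')
--     return any(c in names for c in candidates)
-- ===== Notes on version B (the rewrite author's own statement) =====
-- stated objective: simpler
-- what changed: Replaces the recursive three-branch implementation (with its own scan loop per branch and a recursive call for select_field='') by one pass: build a single candidate-name list according to select_field, then one membership scan.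
import Mathlib
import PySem

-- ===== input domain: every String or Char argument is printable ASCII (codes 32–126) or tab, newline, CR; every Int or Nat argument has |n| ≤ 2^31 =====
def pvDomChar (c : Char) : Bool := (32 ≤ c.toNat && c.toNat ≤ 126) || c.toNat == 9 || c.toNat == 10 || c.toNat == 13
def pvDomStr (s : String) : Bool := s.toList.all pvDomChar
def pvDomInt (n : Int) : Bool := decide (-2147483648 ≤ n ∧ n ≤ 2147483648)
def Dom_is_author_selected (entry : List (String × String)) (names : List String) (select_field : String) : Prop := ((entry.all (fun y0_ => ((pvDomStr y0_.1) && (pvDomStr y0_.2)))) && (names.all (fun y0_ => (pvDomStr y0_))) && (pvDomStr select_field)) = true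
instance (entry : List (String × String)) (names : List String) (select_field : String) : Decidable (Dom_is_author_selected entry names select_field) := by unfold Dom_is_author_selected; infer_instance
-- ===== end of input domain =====

-- B replaces A's recursive three-branch scan by building one candidate list and a single membership pass (objective: simpler).


-- ===== PORT A =====
def is_author_selected (entry : List (String × String)) (names : List String) (select_field : String) : Bool :=
  let author_names := (PySem.Str.split? (((PySem.Dict.mk entry).get? "author").getD "") ", ").getD []
  let k := "author_" ++ select_field
  if select_field = "first" then
    if names.contains ((PySem.List.pyGet? author_names 0).getD "") then true
    else if (PySem.Dict.mk entry).contains k then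
      ((PySem.Str.split? (((PySem.Dict.mk entry).get? k).getD "") ", ").getD []).any
        (fun name => names.contains name)
    else false
  else if select_field = "corresponding" then
    if !(PySem.Dict.mk entry).contains k then false
    else
      ((PySem.Str.split? (((PySem.Dict.mk entry).get? k).getD "") ", ").getD []).any
        (fun name => names.contains name)
  else if select_field = "" then
    is_author_selected entry names "first" || is_author_selected entry names "corresponding"
  else false  -- Python raises ValueError here; excluded by Pre_
termination_by (if select_field = "" then 1 else 0)
decreasing_by all_goals simp_all

-- ===== PORT B =====
def is_author_selected_alt (entry : List (String × String)) (names : List String) (select_field : String) : Bool :=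
  let author_names := (PySem.Str.split? (((PySem.Dict.mk entry).get? "author").getD "") ", ").getD []
  if !(select_field = "" || select_field = "first" || select_field = "corresponding") then
    false  -- Python raises ValueError here; excluded by Pre_
  else
    let candidates :=
      (if select_field ≠ "corresponding" then
        [(PySem.List.pyGet? author_names 0).getD ""] ++
          (if (PySem.Dict.mk entry).contains "author_first" then
            (PySem.Str.split? (((PySem.Dict.mk entry).get? "author_first").getD "") ", ").getD []
          else [])
      else []) ++
      (if select_field ≠ "first" ∧ (PySem.Dict.mk entry).contains "author_corresponding" then
        (PySem.Str.split? (((PySem.Dict.mk entry).get? "author_corresponding").getD "") ", ").getD []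
      else [])
    candidates.any (fun c => names.contains c)

-- ===== PRECONDITION & SPEC =====
-- Pre_ excludes exactly where A raises: a missing 'author' key (KeyError) and a
-- select_field other than '', 'first', 'corresponding' (ValueError).
def Pre_is_author_selected (entry : List (String × String)) (names : List String) (select_field : String) : Prop :=
  ((PySem.Dict.mk entry).contains "author" = true) ∧
  (select_field = "" ∨ select_field = "first" ∨ select_field = "corresponding")
instance (entry : List (String × String)) (names : List String) (select_field : String) : Decidable (Pre_is_author_selected entry names select_field) := by unfold Pre_is_author_selected; infer_instance

def pvWitness_is_author_selected : (List (String × String)) × List String × String :=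
  ([("author", "A. Smith, B. Jones"), ("author_corresponding", "B. Jones")], ["B. Jones"], "")

def Spec_is_author_selected (entry : List (String × String)) (names : List String) (select_field : String) (out : Bool) : Prop := out = is_author_selected_alt entry names select_field
instance (entry : List (String × String)) (names : List String) (select_field : String) (out : Bool) : Decidable (Spec_is_author_selected entry names select_field out) := by unfold Spec_is_author_selected; infer_instance

-- ===== CLAIM (what is proved, stated in full; the proofs are below) =====
def Claim_equal_is_author_selected : Prop := ∀ (entry : List (String × String)) (names : List String) (select_field : String), Dom_is_author_selected entry names select_field → Pre_is_author_selected entry names select_field → Spec_is_author_selected entry names select_field (is_author_selected entry names select_field)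

-- ===== LEMMAS AND PROOFS =====
theorem pvWitness_ok : Dom_is_author_selected pvWitness_is_author_selected.1 pvWitness_is_author_selected.2.1 pvWitness_is_author_selected.2.2 ∧ Pre_is_author_selected pvWitness_is_author_selected.1 pvWitness_is_author_selected.2.1 pvWitness_is_author_selected.2.2 := by decide

theorem agree_first (entry : List (String × String)) (names : List String) :
    is_author_selected entry names "first" = is_author_selected_alt entry names "first" := by
  rw [is_author_selected]
  simp only [is_author_selected_alt]
  by_cases h : names.contains ((PySem.List.pyGet? ((PySem.Str.split? (((PySem.Dict.mk entry).get? "author").getD "") ", ").getD []) 0).getD "") = true <;>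
    split_ifs <;> simp_all

theorem agree_corr (entry : List (String × String)) (names : List String) :
    is_author_selected entry names "corresponding" = is_author_selected_alt entry names "corresponding" := by
  rw [is_author_selected]
  simp only [is_author_selected_alt]
  split_ifs <;> simp_all

theorem agree_empty (entry : List (String × String)) (names : List String) :
    is_author_selected entry names "" = is_author_selected_alt entry names "" := by
  rw [is_author_selected, agree_first, agree_corr]
  simp only [is_author_selected_alt]
  by_cases hf : (PySem.Dict.mk entry).contains "author_first" = true <;>
    by_cases hc : (PySem.Dict.mk entry).contains "author_corresponding" = true <;>
    simp_all [List.any_append, Bool.or_assoc]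

-- ===== VERDICT (by name: the statement is the Claim_ definition above) =====
theorem is_author_selected_spec : Claim_equal_is_author_selected := by
  intro entry names select_field _ hpre
  unfold Spec_is_author_selected
  rcases hpre.2 with h | h | h <;> subst h
  · exact agree_empty entry names
  · exact agree_first entry names
  · exact agree_corr entry names
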